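-- pv_equiv track=rewrite | github.com/luanrsiqueira/cadastro_eleitoral | relatorio_lider.py | organizar_em_colunas
-- ===== SOURCE A (Python) =====
-- import math
--
-- def organizar_em_colunas(dados, num_colunas=2):
--     linhas = math.ceil(len(dados) / num_colunas)
--     colunas = []
--
--     for i in range(num_colunas):
--         colunas.append(dados[i*linhas:(i+1)*linhas])
--
--     # Adicionar espaços em branco para igualar o número de linhas
--     for coluna in colunas:
--         while len(coluna) < linhas:
--             coluna.append(("", ""))
--
--     return colunas
-- ===== SOURCE B (Python) =====
-- import math
--
-- def organizar_em_colunas(dados, num_colunas=2):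
--     linhas = math.ceil(len(dados) / num_colunas)
--     # pre-allocate a blank grid, then write each item into its (column, row) cell
--     colunas = [[("", "")] * linhas for _ in range(num_colunas)]
--     for c, coluna in enumerate(colunas):
--         for r in range(linhas):
--             idx = c * linhas + r
--             if idx < len(dados):
--                 coluna[r] = dados[idx]
--     return colunas
-- ===== Notes on version B (the rewrite author's own statement) =====
-- stated objective: alternative
-- what changed: B pre-allocates a blank num_colunas x linhas grid and scatters each item into its cell [idx // linhas][idx % linhas] by index arithmetic, instead of A's slicing pass followed by a per-column while-loop padding pass; no slicing and no padding loop remain.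
import Mathlib
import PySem

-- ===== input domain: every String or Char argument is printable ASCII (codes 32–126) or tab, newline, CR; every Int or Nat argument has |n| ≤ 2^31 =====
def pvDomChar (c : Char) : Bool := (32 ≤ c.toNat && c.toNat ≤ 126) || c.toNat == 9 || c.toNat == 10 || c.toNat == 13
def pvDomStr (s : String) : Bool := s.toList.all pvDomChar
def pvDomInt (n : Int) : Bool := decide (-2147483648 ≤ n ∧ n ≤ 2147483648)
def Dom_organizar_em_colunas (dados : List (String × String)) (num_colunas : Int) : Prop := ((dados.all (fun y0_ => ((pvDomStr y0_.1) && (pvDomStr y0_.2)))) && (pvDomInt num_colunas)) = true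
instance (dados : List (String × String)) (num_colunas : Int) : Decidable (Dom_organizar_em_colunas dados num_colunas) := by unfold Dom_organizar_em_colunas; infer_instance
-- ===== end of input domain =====

-- ===== PORT A =====
-- B replaces A's slice-then-pad passes with a pre-allocated blank grid filled by index arithmetic (alternative algorithm, same cost); equal value wherever A returns.

-- ===== PORT A =====
-- the 'while len(coluna) < linhas: coluna.append(("",""))' loop, one append per step
def padLoop (linhas : Int) (coluna : List (String × String)) : List (String × String) :=
  if coluna.length < linhas then padLoop linhas (coluna ++ [("", "")]) else coluna
termination_by (linhas - coluna.length).toNat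
decreasing_by simp; omega

-- math.ceil(len(dados)/num_colunas) ported as exact ceiling -((-len) // num_colunas)
def organizar_em_colunas (dados : List (String × String)) (num_colunas : Int) : List (List (String × String)) :=
  let linhas : Int := -(PySem.Int.floordiv (-(dados.length : Int)) num_colunas)
  let colunas := (PySem.List.pyRange 0 num_colunas 1).foldl
    (fun acc i => acc ++ [PySem.List.slice dados (some (i * linhas)) (some ((i + 1) * linhas))]) []
  colunas.map (padLoop linhas)

-- ===== PORT B =====
-- 'coluna[r] = dados[idx]' is guarded by 'idx < len(dados)' and idx ≥ 0, so the index is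
-- in range; ported as getD (exact there).
def organizar_em_colunas_alt (dados : List (String × String)) (num_colunas : Int) : List (List (String × String)) :=
  let linhas : Int := -(PySem.Int.floordiv (-(dados.length : Int)) num_colunas)
  let colunas := (PySem.List.pyRange 0 num_colunas 1).map
    (fun _ => List.replicate linhas.toNat (("", "") : String × String))
  (PySem.List.enumerate colunas 0).map (fun ci =>
    (PySem.List.pyRange 0 linhas 1).foldl (fun col r =>
      let idx := ci.1 * linhas + r
      if idx < (dados.length : Int) then
        col.set r.toNat (PySem.List.pyGetD dados idx ("", ""))
      else col) ci.2)

-- ===== PRECONDITION & SPEC =====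
-- num_colunas = 0 makes the Python raise ZeroDivisionError, hence excluded
def Pre_organizar_em_colunas (dados : List (String × String)) (num_colunas : Int) : Prop := num_colunas ≠ 0
instance (dados : List (String × String)) (num_colunas : Int) : Decidable (Pre_organizar_em_colunas dados num_colunas) := by unfold Pre_organizar_em_colunas; infer_instance
def pvWitness_organizar_em_colunas : (List (String × String)) × Int := ([("a", "1"), ("b", "2"), ("c", "3")], 2)
def Spec_organizar_em_colunas (dados : List (String × String)) (num_colunas : Int) (out : List (List (String × String))) : Prop := out = organizar_em_colunas_alt dados num_colunas
instance (dados : List (String × String)) (num_colunas : Int) (out : List (List (String × String))) : Decidable (Spec_organizar_em_colunas dados num_colunas out) := by unfold Spec_organizar_em_colunas; infer_instance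

-- ===== CLAIM (what is proved, stated in full; the proofs are below) =====
def Claim_equal_organizar_em_colunas : Prop := ∀ (dados : List (String × String)) (num_colunas : Int), Dom_organizar_em_colunas dados num_colunas → Pre_organizar_em_colunas dados num_colunas → Spec_organizar_em_colunas dados num_colunas (organizar_em_colunas dados num_colunas)

-- ===== LEMMAS AND PROOFS =====

theorem padLoop_eq (l : Int) (c : List (String × String)) :
    padLoop l c = c ++ List.replicate (l - c.length).toNat ("", "") := by
  fun_induction padLoop l c with
  | case1 c h ih =>
      rw [ih]
      have : (l - c.length).toNat = (l - ((c ++ [(("",""):String×String)]).length : Int)).toNat + 1 := by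
        simp; omega
      rw [this, List.replicate_succ]
      simp
  | case2 c h =>
      have : (l - c.length).toNat = 0 := by omega
      simp [this]

theorem foldl_snoc {α β : Type} (f : α → β) (xs : List α) (acc : List β) :
    xs.foldl (fun a i => a ++ [f i]) acc = acc ++ xs.map f := by
  induction xs generalizing acc with
  | nil => simp
  | cons x xs ih => simp [List.foldl_cons, ih]

-- the grid-fill inner loop over List.range: length preserved, entry r written iff r < m and a+r in range
theorem fill_range (dados : List (String × String)) (a : Int) (m : Nat)
    (col : List (String × String)) :
    (List.range m).foldl (fun col (r : Nat) =>
        if a + (r : Int) < (dados.length : Int) then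
          col.set r (PySem.List.pyGetD dados (a + (r : Int)) ("", ""))
        else col) col
    = List.ofFn (n := col.length) (fun r =>
        if (r : Nat) < m ∧ a + ((r : Nat) : Int) < (dados.length : Int) then
          PySem.List.pyGetD dados (a + ((r : Nat) : Int)) ("", "")
        else col[r]) := by
  induction m with
  | zero =>
      simp [List.ofFn_getElem]
  | succ m ih =>
      rw [List.range_succ, List.foldl_append, ih, List.foldl_cons, List.foldl_nil]
      by_cases hc : a + (m : Int) < (dados.length : Int)
      · rw [if_pos hc]
        apply List.ext_getElem
        · simp
        · intro r h1 h2
          simp only [List.length_ofFn] at h2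
          rw [List.getElem_set, List.getElem_ofFn, List.getElem_ofFn]
          simp only [Fin.val_mk]
          split_ifs <;> first | rfl | omega | (rename_i he _; subst he; rfl)
      · rw [if_neg hc]
        apply List.ext_getElem
        · simp
        · intro r h1 h2
          rw [List.getElem_ofFn, List.getElem_ofFn]
          simp only [Fin.val_mk]
          split_ifs <;> first | rfl | omega

theorem organizar_spec_aux (dados : List (String × String)) (n : Int) (hn : n ≠ 0) :
    organizar_em_colunas dados n = organizar_em_colunas_alt dados n := by
  rcases lt_or_gt_of_ne hn with hneg | hpos
  · -- range(n) is empty for n < 0: both sides are []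
    unfold organizar_em_colunas organizar_em_colunas_alt
    rw [PySem.List.pyRange_one_eq_nil (by omega)]
    simp
  · set L : Int := (dados.length : Int) with hL
    set l : Int := -(PySem.Int.floordiv (-L) n) with hl
    have hceil := (PySem.Int.neg_floordiv_neg_eq_iff_of_pos (a := L) (b := n) (q := l) hpos).mp rfl
    have hLnn : (0:Int) ≤ L := by simp [hL]
    have hl0 : 0 ≤ l := by nlinarith [hceil.1, hceil.2]
    show ((PySem.List.pyRange 0 n 1).foldl
        (fun acc i => acc ++ [PySem.List.slice dados (some (i * l)) (some ((i + 1) * l))]) []).map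
        (padLoop l)
      = (PySem.List.enumerate ((PySem.List.pyRange 0 n 1).map
          (fun _ => List.replicate l.toNat (("", "") : String × String))) 0).map (fun ci =>
        (PySem.List.pyRange 0 l 1).foldl (fun col r =>
          if ci.1 * l + r < L then col.set r.toNat (PySem.List.pyGetD dados (ci.1 * l + r) ("", ""))
          else col) ci.2)
    rw [foldl_snoc, List.nil_append, List.map_map]
    rw [PySem.List.enumerate_eq_map_pyRange (d := List.replicate l.toNat (("", "") : String × String))]
    rw [List.map_map]
    have hlen : PySem.List.len ((PySem.List.pyRange 0 n 1).map
        (fun _ => List.replicate l.toNat (("", "") : String × String))) = n := by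
      simp [PySem.List.len, PySem.List.length_pyRange_one]
      omega
    rw [hlen]
    apply List.map_congr_left
    intro i hi
    rw [PySem.List.mem_pyRange_one] at hi
    obtain ⟨hi0, hin⟩ := hi
    simp only [Function.comp]
    rw [PySem.List.pyGetD_map_pyRange_of_nonneg _ _ _ _ hi0 hin]
    -- rewrite the B-side fold into a fold over List.range
    have hB : (PySem.List.pyRange 0 l 1).foldl (fun col r =>
          if i * l + r < L then col.set r.toNat (PySem.List.pyGetD dados (i * l + r) ("", ""))
          else col) (List.replicate l.toNat (("", "") : String × String))
        = (List.range l.toNat).foldl (fun col (r : Nat) =>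
            if i * l + (r : Int) < (dados.length : Int) then
              col.set r (PySem.List.pyGetD dados (i * l + (r : Int)) ("", ""))
            else col) (List.replicate l.toNat (("", "") : String × String)) := by
      rw [PySem.List.pyRange_one, List.foldl_map]
      simp only [zero_add, Int.toNat_natCast, Int.sub_zero, hL]
    rw [hB, fill_range]
    -- A-side column: slice then pad
    have hil : 0 ≤ i * l := mul_nonneg hi0 hl0
    have hi1l : 0 ≤ (i + 1) * l := mul_nonneg (by omega) hl0
    rw [PySem.List.slice_toNat _ hil hi1l, padLoop_eq]
    have hmul : (i + 1) * l = i * l + l := by ring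
    have htsub : ((i + 1) * l).toNat - (i * l).toNat = l.toNat := by rw [hmul]; omega
    rw [htsub]
    set a : Nat := (i * l).toNat with ha
    have haa : ((a : Nat) : Int) = i * l := by rw [ha]; omega
    apply List.ext_getElem
    · simp only [List.length_append, List.length_take, List.length_drop,
        List.length_replicate, List.length_ofFn]
      omega
    · intro r h1 h2
      simp only [List.length_ofFn, List.length_replicate] at h2
      rw [List.getElem_ofFn]
      simp only [List.getElem_replicate]
      by_cases hr : a + r < dados.length
      · rw [List.getElem_append_left (by simp only [List.length_take, List.length_drop]; omega)]
        rw [List.getElem_take, List.getElem_drop]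
        rw [if_pos (And.intro h2 (by rw [← haa]; omega))]
        rw [PySem.List.pyGetD_eq_getElem _ _ (by rw [← haa]; omega)
          (by rw [← haa]; omega)]
        congr 1
        rw [← haa]; omega
      · rw [List.getElem_append_right (by simp only [List.length_take, List.length_drop]; omega)]
        rw [List.getElem_replicate]
        rw [if_neg (by rintro ⟨h3, h4⟩; rw [← haa] at h4; omega)]
        simp

-- ===== VERDICT (by name: the statement is the Claim_ definition above) =====
theorem organizar_em_colunas_spec : Claim_equal_organizar_em_colunas := by
  intro dados num_colunas _ hpre
  unfold Spec_organizar_em_colunas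
  exact organizar_spec_aux dados num_colunas hpre
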